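-- pv_equiv track=rewrite | github.com/ssj9398/ps | programmers/부족한 금액 계산하기.py | solution
-- ===== SOURCE A (Python) =====
-- def solution(price, money, count):
--     sum = 0
--     for i in range(1, count + 1):
--         sum += price * i
--     if sum >= money:
--         res = sum - money
--     else:
--         res = 0
--     return res
-- ===== SOURCE B (Python) =====
-- def solution(price, money, count):
--     m = max(count, 0)
--     total = price * m * (m + 1) // 2
--     return max(total - money, 0)
-- ===== Notes on version B (the rewrite author's own statement) =====
-- stated objective: faster
-- what changed: Replaces the O(count) summation loop by the closed-form arithmetic-series formula price*m*(m+1)//2 and a max for the shortfall.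
import Mathlib
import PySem

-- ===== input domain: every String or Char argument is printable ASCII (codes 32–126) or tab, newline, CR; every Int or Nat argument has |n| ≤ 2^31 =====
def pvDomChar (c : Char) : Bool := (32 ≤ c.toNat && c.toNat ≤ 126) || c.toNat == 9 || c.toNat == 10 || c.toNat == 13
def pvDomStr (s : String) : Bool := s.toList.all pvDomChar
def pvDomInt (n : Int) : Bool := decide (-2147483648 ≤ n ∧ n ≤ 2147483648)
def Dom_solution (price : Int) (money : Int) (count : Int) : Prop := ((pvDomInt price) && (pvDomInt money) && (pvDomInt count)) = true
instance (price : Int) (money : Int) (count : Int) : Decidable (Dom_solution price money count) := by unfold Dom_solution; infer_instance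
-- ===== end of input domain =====

-- B replaces A's O(count) summation loop by the closed-form arithmetic-series formula (faster, asymptotic).

-- ===== PORT A =====
def solution (price : Int) (money : Int) (count : Int) : Int :=
  let sum := (PySem.List.pyRange 1 (count + 1) 1).foldl (fun s i => s + price * i) 0
  if sum ≥ money then sum - money else 0

-- ===== PORT B =====
def solution_alt (price : Int) (money : Int) (count : Int) : Int :=
  let m := max count 0
  let total := PySem.Int.floordiv (price * m * (m + 1)) 2
  max (total - money) 0

-- ===== PRECONDITION & SPEC =====
def Spec_solution (price : Int) (money : Int) (count : Int) (out : Int) : Prop := out = solution_alt price money count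
instance (price : Int) (money : Int) (count : Int) (out : Int) : Decidable (Spec_solution price money count out) := by unfold Spec_solution; infer_instance

-- ===== CLAIM (what is proved, stated in full; the proofs are below) =====
def Claim_equal_solution : Prop := ∀ (price : Int) (money : Int) (count : Int), Dom_solution price money count → Spec_solution price money count (solution price money count)

-- ===== LEMMAS AND PROOFS =====

-- twice A's loop sum over range(1, n+1) equals price * n * (n+1)
theorem pv_sum_loop (price : Int) : ∀ n : Nat,
    2 * ((PySem.List.pyRange 1 ((n : Int) + 1) 1).foldl (fun s i => s + price * i) 0)
      = price * (n : Int) * ((n : Int) + 1) := by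
  intro n
  induction n with
  | zero => simp [PySem.List.pyRange_one_eq_nil]
  | succ n ih =>
    have hsplit : PySem.List.pyRange 1 (((n + 1 : Nat) : Int) + 1) 1
        = PySem.List.pyRange 1 ((n : Int) + 1) 1 ++ [(n : Int) + 1] := by
      have h := PySem.List.pyRange_one_succ_right (a := 1) (b := (n : Int) + 1) (by omega)
      push_cast
      convert h using 3
    rw [hsplit, List.foldl_append]
    simp only [List.foldl]
    push_cast
    linear_combination ih

theorem solution_eq_alt (price money count : Int) :
    solution price money count = solution_alt price money count := by
  unfold solution solution_alt
  by_cases hc : count ≤ 0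
  · have hnil : PySem.List.pyRange 1 (count + 1) 1 = [] :=
      PySem.List.pyRange_one_eq_nil (by omega)
    have hm : max count 0 = 0 := by omega
    simp only [hnil, hm, List.foldl_nil]
    have h0 : PySem.Int.floordiv (price * 0 * (0 + 1)) 2 = 0 := by
      rw [PySem.Int.floordiv_eq_ediv_of_pos (by norm_num : (0:Int) < 2)]
      norm_num
    simp only [h0]
    omega
  · rw [not_le] at hc
    obtain ⟨n, rfl⟩ : ∃ n : Nat, count = (n : Int) := ⟨count.toNat, by omega⟩
    have hm : max ((n : Int)) 0 = (n : Int) := by omega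
    rw [hm]
    set S := (PySem.List.pyRange 1 ((n : Int) + 1) 1).foldl (fun s i => s + price * i) 0 with hS
    have h2 : 2 * S = price * (n : Int) * ((n : Int) + 1) := pv_sum_loop price n
    have hdiv : PySem.Int.floordiv (price * (n : Int) * ((n : Int) + 1)) 2 = S := by
      rw [← h2, PySem.Int.floordiv_eq_ediv_of_pos (by norm_num : (0:Int) < 2)]
      exact Int.mul_ediv_cancel_left S (by norm_num)
    simp only [hdiv]
    omega

-- ===== VERDICT (by name: the statement is the Claim_ definition above) =====
theorem solution_spec : Claim_equal_solution := by
  intro price money count _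
  unfold Spec_solution
  exact solution_eq_alt price money count
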